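-- pv_equiv track=rewrite | github.com/pypi-data/pypi-mirror-268 | packages/flavtool/flavtool-0.1.1-py3-none-any.whl/flavtool/composer/composer.py | __select_criteria
-- ===== SOURCE A (Python) =====
-- from typing import Literal
--
-- media_types = Literal["tast", "soun", "vide", "scnt"]
--
-- def __select_criteria(target_media_types: list[media_types]) -> tuple[media_types, list[media_types]]:
--     priorities : list[media_types] = ["vide", "soun", "tast", "scnt"]
--     for mt in priorities:
--         if mt in target_media_types:
--             criteria = mt
--             others =  target_media_types.copy()
--             others.remove(criteria)
--             return criteria, others
-- ===== SOURCE B (Python) =====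
-- def __select_criteria(target_media_types):
--     rank = {"vide": 0, "soun": 1, "tast": 2, "scnt": 3}
--     best = None
--     best_r = None
--     for mt in target_media_types:
--         r = rank.get(mt)
--         if r is not None and (best_r is None or r < best_r):
--             best, best_r = mt, r
--     if best is None:
--         return
--     others = list(target_media_types)
--     others.remove(best)
--     return best, others
-- ===== Notes on version B (the rewrite author's own statement) =====
-- stated objective: alternative
-- what changed: Replaces the per-priority membership scans over the input with a single pass over target_media_types that tracks the element of minimal rank via a priority-rank dict, then removes its first occurrence.
-- outside the precondition, e.g. on __select_criteria([]): A returns None, B returns None; on __select_criteria(['abcd']): A returns None, B returns None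
import Mathlib
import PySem

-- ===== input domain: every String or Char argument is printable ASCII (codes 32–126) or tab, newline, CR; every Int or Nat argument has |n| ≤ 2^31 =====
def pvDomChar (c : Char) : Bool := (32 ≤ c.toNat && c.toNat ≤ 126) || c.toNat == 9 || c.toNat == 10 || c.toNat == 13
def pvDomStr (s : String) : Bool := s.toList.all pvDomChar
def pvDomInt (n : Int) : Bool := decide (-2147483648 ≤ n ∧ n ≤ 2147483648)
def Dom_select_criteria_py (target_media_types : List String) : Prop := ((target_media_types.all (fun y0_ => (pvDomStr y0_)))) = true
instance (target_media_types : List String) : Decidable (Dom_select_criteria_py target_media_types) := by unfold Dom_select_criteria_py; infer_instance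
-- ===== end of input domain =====

-- B replaces A's per-priority membership scans with one table-driven min-rank pass over the
-- input (objective: alternative). Equivalence is about the RETURN value; neither mutates its input.

-- ===== PORT A =====
-- the 'for mt in priorities' loop: first priority present in the target list wins;
-- 'others.remove' = first occurrence removed (membership-guarded, so remove? is some).
-- Python falls off the loop with an implicit None when no priority is present; that is
-- outside Pre_ below, the port returns ("", []) there.
def selA_loop (priorities : List String) (t : List String) : String × List String :=
  match priorities with
  | [] => ("", [])
  | mt :: rest =>
    if mt ∈ t then (mt, (PySem.List.remove? t mt).getD t)
    else selA_loop rest t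

def select_criteria_py (target_media_types : List String) : String × List String :=
  selA_loop ["vide", "soun", "tast", "scnt"] target_media_types

-- ===== PORT B =====
-- rank = {"vide": 0, "soun": 1, "tast": 2, "scnt": 3}
def pvRank : PySem.Dict String Int := PySem.Dict.ofList [("vide", 0), ("soun", 1), ("tast", 2), ("scnt", 3)]

-- the 'for mt in target_media_types' loop of Source B: best/best_r carried as one Option
def selB_loop (t : List String) (best : Option (String × Int)) : Option (String × Int) :=
  match t with
  | [] => best
  | mt :: rest =>
    match pvRank.get? mt with
    | none => selB_loop rest best
    | some r =>
      match best with
      | none => selB_loop rest (some (mt, r))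
      | some (_, br) => if r < br then selB_loop rest (some (mt, r)) else selB_loop rest best

-- 'if best is None: return' is the implicit-None branch, outside Pre_; ("", []) there.
def select_criteria_py_alt (target_media_types : List String) : String × List String :=
  match selB_loop target_media_types none with
  | none => ("", [])
  | some (b, _) => (b, (PySem.List.remove? target_media_types b).getD target_media_types)

-- ===== PRECONDITION & SPEC =====
-- Pre_ excludes inputs containing none of the four media types, on which A (and B) fall
-- through and return the implicit None, which is not a value of the declared tuple type.
def Pre_select_criteria_py (target_media_types : List String) : Prop :=
  "vide" ∈ target_media_types ∨ "soun" ∈ target_media_types ∨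
  "tast" ∈ target_media_types ∨ "scnt" ∈ target_media_types
instance (target_media_types : List String) : Decidable (Pre_select_criteria_py target_media_types) := by unfold Pre_select_criteria_py; infer_instance
def pvWitness_select_criteria_py : List String := ["tast", "vide", "tast"]

def Spec_select_criteria_py (target_media_types : List String) (out : String × List String) : Prop := out = select_criteria_py_alt target_media_types
instance (target_media_types : List String) (out : String × List String) : Decidable (Spec_select_criteria_py target_media_types out) := by unfold Spec_select_criteria_py; infer_instance

-- ===== CLAIM (what is proved, stated in full; the proofs are below) =====
def Claim_equal_select_criteria_py : Prop := ∀ (target_media_types : List String), Dom_select_criteria_py target_media_types → Pre_select_criteria_py target_media_types → Spec_select_criteria_py target_media_types (select_criteria_py target_media_types)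

-- ===== LEMMAS AND PROOFS =====

lemma rank_get (x : String) : pvRank.get? x =
    if x = "vide" then some 0 else if x = "soun" then some 1
    else if x = "tast" then some 2 else if x = "scnt" then some 3 else none := by
  by_cases h1 : x = "vide"
  · subst h1; decide
  by_cases h2 : x = "soun"
  · subst h2; decide
  by_cases h3 : x = "tast"
  · subst h3; decide
  by_cases h4 : x = "scnt"
  · subst h4; decide
  simp only [h1, h2, h3, h4, if_false]
  simp [pvRank, PySem.Dict.ofList, PySem.Dict.update,
    PySem.Dict.get?_insert_of_ne _ _ h1, PySem.Dict.get?_insert_of_ne _ _ h2,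
    PySem.Dict.get?_insert_of_ne _ _ h3, PySem.Dict.get?_insert_of_ne _ _ h4]

lemma selB_vide (t : List String) : selB_loop t (some ("vide", 0)) = some ("vide", 0) := by
  induction t with
  | nil => rfl
  | cons x xs ih =>
    simp only [selB_loop, rank_get x]
    split_ifs <;> simp [ih]

lemma selB_soun (t : List String) :
    selB_loop t (some ("soun", 1)) =
      if "vide" ∈ t then some ("vide", 0) else some ("soun", 1) := by
  induction t with
  | nil => rfl
  | cons x xs ih =>
    simp only [selB_loop, rank_get x]
    split_ifs with h1 h2 h3 h4 <;>
      simp_all [selB_vide, List.mem_cons] <;> tauto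

lemma selB_tast (t : List String) :
    selB_loop t (some ("tast", 2)) =
      if "vide" ∈ t then some ("vide", 0)
      else if "soun" ∈ t then some ("soun", 1) else some ("tast", 2) := by
  induction t with
  | nil => rfl
  | cons x xs ih =>
    simp only [selB_loop, rank_get x]
    split_ifs with h1 h2 h3 h4 <;>
      simp_all [selB_vide, selB_soun, List.mem_cons] <;> tauto

lemma selB_scnt (t : List String) :
    selB_loop t (some ("scnt", 3)) =
      if "vide" ∈ t then some ("vide", 0)
      else if "soun" ∈ t then some ("soun", 1)
      else if "tast" ∈ t then some ("tast", 2) else some ("scnt", 3) := by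
  induction t with
  | nil => rfl
  | cons x xs ih =>
    simp only [selB_loop, rank_get x]
    split_ifs with h1 h2 h3 h4 <;>
      simp_all [selB_vide, selB_soun, selB_tast, List.mem_cons] <;> tauto

lemma selB_none (t : List String) :
    selB_loop t none =
      if "vide" ∈ t then some ("vide", 0)
      else if "soun" ∈ t then some ("soun", 1)
      else if "tast" ∈ t then some ("tast", 2)
      else if "scnt" ∈ t then some ("scnt", 3) else none := by
  induction t with
  | nil => rfl
  | cons x xs ih =>
    simp only [selB_loop, rank_get x]
    split_ifs with h1 h2 h3 h4 <;>
      simp_all [selB_vide, selB_soun, selB_tast, selB_scnt, List.mem_cons] <;> tauto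

-- ===== VERDICT (by name: the statement is the Claim_ definition above) =====
theorem select_criteria_py_spec : Claim_equal_select_criteria_py := by
  intro t _dom pre
  unfold Spec_select_criteria_py select_criteria_py select_criteria_py_alt
  rw [selB_none]
  by_cases h1 : "vide" ∈ t
  · simp [selA_loop, h1]
  by_cases h2 : "soun" ∈ t
  · simp [selA_loop, h1, h2]
  by_cases h3 : "tast" ∈ t
  · simp [selA_loop, h1, h2, h3]
  by_cases h4 : "scnt" ∈ t
  · simp [selA_loop, h1, h2, h3, h4]
  · exact absurd pre (by simp [Pre_select_criteria_py, h1, h2, h3, h4])
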